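-- pv_equiv track=rewrite | github.com/sshh12/SchoolCode | Algorithms/Greedy/SmallestNumber.py | get_smallest_num
-- ===== SOURCE A (Python) =====
-- def get_smallest_num(digit_sum, n_digits):
--
--     if digit_sum <= 0 or digit_sum > 9 * n_digits: return -1
--
--     result = [ 0 ] * n_digits
--
--     digit_sum -= 1
--
--     for i in reversed(range(1, n_digits)):
--
--         if digit_sum > 9:
--
--             result[i] = 9
--             digit_sum -= 9
--
--         else:
--
--             result[i] = digit_sum
--             digit_sum = 0
--
--     result[0] = digit_sum + 1
--
--     n, power = 0, 1
--
--     for i in reversed(range(n_digits)):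
--
--         n += power * result[i]
--
--         power *= 10
--
--     return n
-- ===== SOURCE B (Python) =====
-- def get_smallest_num(digit_sum, n_digits):
--     # Left-to-right single pass: each digit has a closed form, accumulate with Horner.
--     if digit_sum <= 0 or digit_sum > 9 * n_digits:
--         return -1
--     n = max(1, digit_sum - 9 * (n_digits - 1))
--     for i in range(1, n_digits):
--         n = 10 * n + min(9, max(0, digit_sum - 1 - 9 * (n_digits - 1 - i)))
--     return n
-- ===== Notes on version B (the rewrite author's own statement) =====
-- stated objective: simpler
-- what changed: B replaces A's right-to-left reserve-and-fill digit array plus a second positional-power summation loop by a single left-to-right pass that computes each digit with a closed form (leading digit max(1, s-9*(n-1)), later digits min(9, max(0, s-1-9*(n-1-i)))) and accumulates the answer by Horner's rule, with no array and no second loop.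
import Mathlib
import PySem

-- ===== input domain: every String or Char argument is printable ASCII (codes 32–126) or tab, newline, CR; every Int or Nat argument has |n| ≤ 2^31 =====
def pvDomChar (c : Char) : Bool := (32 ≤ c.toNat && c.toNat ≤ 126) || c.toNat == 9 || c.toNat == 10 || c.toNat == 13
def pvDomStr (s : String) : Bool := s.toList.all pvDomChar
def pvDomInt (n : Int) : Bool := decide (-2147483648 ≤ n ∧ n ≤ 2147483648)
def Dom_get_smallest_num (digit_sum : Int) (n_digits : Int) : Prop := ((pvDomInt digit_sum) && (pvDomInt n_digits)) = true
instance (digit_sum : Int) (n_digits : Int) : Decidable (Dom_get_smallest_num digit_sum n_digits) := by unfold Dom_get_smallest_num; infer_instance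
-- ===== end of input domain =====

-- B replaces A's right-to-left reserve-and-fill pass plus separate positional-power
-- build loop by ONE left-to-right pass with a closed form for every digit and Horner
-- accumulation (objective: simpler — no digit array, no second loop).

-- ===== PORT A =====
-- literal transliteration of A: guard, digit array filled right-to-left, then a
-- reversed power-sum loop over the array.
def get_smallest_num (digit_sum : Int) (n_digits : Int) : Int :=
  if digit_sum ≤ 0 ∨ 9 * n_digits < digit_sum then -1
  else
    let result : List Int := List.replicate n_digits.toNat 0
    let ds := digit_sum - 1
    let st :=
      ((PySem.List.pyRange 1 n_digits 1).reverse).foldl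
        (fun (st : List Int × Int) i =>
          if st.2 > 9 then (PySem.List.pySetD st.1 i 9, st.2 - 9)
          else (PySem.List.pySetD st.1 i st.2, (0 : Int)))
        (result, ds)
    let result2 := PySem.List.pySetD st.1 0 (st.2 + 1)
    let fin :=
      ((PySem.List.pyRange 0 n_digits 1).reverse).foldl
        (fun (st : Int × Int) i =>
          (st.1 + st.2 * PySem.List.pyGetD result2 i 0, st.2 * 10))
        ((0 : Int), (1 : Int))
    fin.1

-- ===== PORT B =====
-- literal transliteration of Source B: same guard, then a single left-to-right loop
-- 'n = 10*n + min(9, max(0, digit_sum-1-9*(n_digits-1-i)))' started at the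
-- closed-form leading digit.
def get_smallest_num_alt (digit_sum : Int) (n_digits : Int) : Int :=
  if digit_sum ≤ 0 ∨ 9 * n_digits < digit_sum then -1
  else
    (PySem.List.pyRange 1 n_digits 1).foldl
      (fun n i => 10 * n + min 9 (max 0 (digit_sum - 1 - 9 * (n_digits - 1 - i))))
      (max 1 (digit_sum - 9 * (n_digits - 1)))

-- ===== PRECONDITION & SPEC =====
def Spec_get_smallest_num (digit_sum : Int) (n_digits : Int) (out : Int) : Prop := out = get_smallest_num_alt digit_sum n_digits
instance (digit_sum : Int) (n_digits : Int) (out : Int) : Decidable (Spec_get_smallest_num digit_sum n_digits out) := by unfold Spec_get_smallest_num; infer_instance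

-- ===== CLAIM (what is proved, stated in full; the proofs are below) =====
def Claim_equal_get_smallest_num : Prop := ∀ (digit_sum : Int) (n_digits : Int), Dom_get_smallest_num digit_sum n_digits → Spec_get_smallest_num digit_sum n_digits (get_smallest_num digit_sum n_digits)

-- ===== LEMMAS AND PROOFS =====

-- the j-th digit (0 = most significant) of the answer for digit sum s, n digits
def pvDigit (s n : Int) (j : ℕ) : Int :=
  if j = 0 then max 1 (s - 9 * (n - 1))
  else min 9 (max 0 (s - 1 - 9 * (n - 1 - (j : Int))))

-- Horner value of the first m digits
def pvV (s n : Int) : ℕ → Int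
  | 0 => 0
  | k + 1 => 10 * pvV s n k + pvDigit s n k

-- Horner value of the first m entries of a list
def pvH (R : List Int) : ℕ → Int
  | 0 => 0
  | k + 1 => 10 * pvH R k + R.getD k 0

lemma pv_getD_set_eq (l : List Int) (i : ℕ) (v d : Int) (h : i < l.length) :
    (l.set i v).getD i d = v := by
  simp [List.getD_eq_getElem?_getD, h]

lemma pv_getD_set_ne (l : List Int) (i j : ℕ) (v d : Int) (hne : i ≠ j) :
    (l.set i v).getD j d = l.getD j d := by
  simp [List.getD_eq_getElem?_getD, hne]

-- A's first loop: fold over [m, m-1, …, 1] (descending) from (r, b)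
lemma pv_loop1 (m : ℕ) (r : List Int) (b : Int) (hb : 0 ≤ b) (hm : m < r.length)
    (st : List Int × Int)
    (heq : (((List.range m).map (fun k : ℕ => (1 : Int) + (k : Int))).reverse).foldl
      (fun (st : List Int × Int) i =>
        if st.2 > 9 then (PySem.List.pySetD st.1 i 9, st.2 - 9)
        else (PySem.List.pySetD st.1 i st.2, (0 : Int))) (r, b) = st) :
    st.2 = max 0 (b - 9 * m) ∧ st.1.length = r.length ∧
    ∀ j : ℕ, st.1.getD j 0 =
      if 1 ≤ j ∧ j ≤ m then min 9 (max 0 (b - 9 * ((m : Int) - j))) else r.getD j 0 := by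
  induction m generalizing r b st with
  | zero =>
    simp only [List.range_zero, List.map_nil, List.reverse_nil, List.foldl_nil] at heq
    subst heq
    refine ⟨by omega, rfl, fun j => ?_⟩
    rw [if_neg (by omega)]
  | succ m ih =>
    have hcast : (1 : Int) + (m : Int) = ((m + 1 : ℕ) : Int) := by push_cast; ring
    have hstep :
        (if b > 9 then (PySem.List.pySetD r ((1 : Int) + m) 9, b - 9)
          else (PySem.List.pySetD r ((1 : Int) + m) b, (0 : Int)))
        = (r.set (m + 1) (min 9 b), max 0 (b - 9)) := by
      simp only [hcast, PySem.List.pySetD_natCast]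
      split_ifs with h
      · have h9 : min 9 b = 9 := by omega
        rw [h9]
        refine Prod.ext rfl ?_
        simp only
        omega
      · have h9 : min 9 b = b := by omega
        rw [h9]
        refine Prod.ext rfl ?_
        simp only
        omega
    rw [List.range_succ, List.map_append, List.reverse_append] at heq
    simp only [List.map_cons, List.map_nil, List.reverse_cons, List.reverse_nil,
      List.nil_append, List.cons_append, List.foldl_cons] at heq
    rw [hstep] at heq
    have hm' : m < (r.set (m + 1) (min 9 b)).length := by
      rw [List.length_set]; omega
    obtain ⟨h2, hlen, hpt⟩ := ih (r.set (m + 1) (min 9 b)) (max 0 (b - 9)) (by omega) hm' st heq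
    refine ⟨by push_cast; omega, by rw [hlen, List.length_set], fun j => ?_⟩
    rcases eq_or_ne j (m + 1) with rfl | hj
    · rw [hpt (m + 1)]
      have hno : ¬ (1 ≤ m + 1 ∧ m + 1 ≤ m) := by omega
      rw [if_neg hno, pv_getD_set_eq _ _ _ _ (by omega),
        if_pos (by omega : 1 ≤ m + 1 ∧ m + 1 ≤ m + 1)]
      push_cast
      omega
    · rw [hpt j]
      by_cases hin : 1 ≤ j ∧ j ≤ m
      · rw [if_pos hin, if_pos (by omega : 1 ≤ j ∧ j ≤ m + 1)]
        push_cast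
        omega
      · rw [if_neg hin, if_neg (by omega : ¬ (1 ≤ j ∧ j ≤ m + 1)),
          pv_getD_set_ne _ _ _ _ _ (by omega)]

-- A's second loop: reversed power-sum fold equals Horner
lemma pv_loop2 (R : List Int) (m : ℕ) (a p : Int) :
    ((((List.range m).map (fun k : ℕ => (0 : Int) + (k : Int))).reverse).foldl
      (fun (st : Int × Int) i =>
        (st.1 + st.2 * PySem.List.pyGetD R i 0, st.2 * 10)) (a, p)).1
    = a + p * pvH R m := by
  induction m generalizing a p with
  | zero => simp [pvH]
  | succ m ih =>
    rw [List.range_succ, List.map_append, List.reverse_append]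
    simp only [List.map_cons, List.map_nil, List.reverse_cons, List.reverse_nil,
      List.nil_append, List.cons_append, List.foldl_cons]
    have hg : PySem.List.pyGetD R ((0 : Int) + m) 0 = R.getD m 0 := by
      rw [zero_add, PySem.List.pyGetD_natCast]
    rw [hg, ih]
    simp only [pvH]
    ring

-- pvH agrees with pvV when the list agrees with pvDigit
lemma pv_H_eq_V (s n : Int) (R : List Int) (N : ℕ)
    (hpt : ∀ j : ℕ, j < N → R.getD j 0 = pvDigit s n j) :
    ∀ m : ℕ, m ≤ N → pvH R m = pvV s n m := by
  intro m
  induction m with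
  | zero => intro _; rfl
  | succ m ih =>
    intro hm
    simp only [pvH, pvV, ih (by omega), hpt m (by omega)]

-- B's loop: left-to-right Horner over the closed-form digits
lemma pv_loopB (s n : Int) (m : ℕ) :
    ((List.range m).map (fun k : ℕ => (1 : Int) + (k : Int))).foldl
      (fun a i => 10 * a + min 9 (max 0 (s - 1 - 9 * (n - 1 - i))))
      (max 1 (s - 9 * (n - 1)))
    = pvV s n (m + 1) := by
  induction m with
  | zero => simp [pvV, pvDigit]
  | succ m ih =>
    rw [List.range_succ, List.map_append, List.foldl_append, ih]
    simp only [List.map_cons, List.map_nil, List.foldl_cons, List.foldl_nil]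
    have hd : min 9 (max 0 (s - 1 - 9 * (n - 1 - ((1 : Int) + m)))) = pvDigit s n (m + 1) := by
      unfold pvDigit
      rw [if_neg (by omega : ¬ (m + 1 = 0))]
      have hc : (n : Int) - 1 - ((m + 1 : ℕ) : Int) = n - 1 - (1 + (m : Int)) := by
        push_cast; ring
      rw [hc]
    rw [hd]
    rfl

-- ===== VERDICT (by name: the statement is the Claim_ definition above) =====
theorem get_smallest_num_spec : Claim_equal_get_smallest_num := by
  intro s n _
  unfold Spec_get_smallest_num get_smallest_num get_smallest_num_alt
  by_cases hg : s ≤ 0 ∨ 9 * n < s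
  · rw [if_pos hg, if_pos hg]
  · rw [if_neg hg, if_neg hg]
    rw [not_or, not_le, not_lt] at hg
    obtain ⟨hs, hs9⟩ := hg
    have hn : 1 ≤ n := by nlinarith
    have hm : ((n - 1).toNat : Int) = n - 1 := Int.toNat_of_nonneg (by omega)
    rw [PySem.List.pyRange_one 1 n, PySem.List.pyRange_one 0 n]
    dsimp only
    have hlen : (n - 1).toNat < (List.replicate n.toNat (0 : Int)).length := by
      rw [List.length_replicate]; omega
    obtain ⟨hb2, hblen, hbpt⟩ :=
      pv_loop1 (n - 1).toNat (List.replicate n.toNat (0 : Int)) (s - 1) (by omega) hlen _ rfl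
    set st := (((List.range (n - 1).toNat).map (fun k : ℕ => (1 : Int) + (k : Int))).reverse).foldl
      (fun (st : List Int × Int) i =>
        if st.2 > 9 then (PySem.List.pySetD st.1 i 9, st.2 - 9)
        else (PySem.List.pySetD st.1 i st.2, (0 : Int)))
      (List.replicate n.toNat (0 : Int), s - 1) with hst
    have hset0 : PySem.List.pySetD st.1 0 (st.2 + 1) = st.1.set 0 (st.2 + 1) := by
      have h0 : (0 : Int) = ((0 : ℕ) : Int) := rfl
      rw [h0, PySem.List.pySetD_natCast]
    have hpt : ∀ j : ℕ, j < n.toNat →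
        (st.1.set 0 (st.2 + 1)).getD j 0 = pvDigit s n j := by
      intro j hj
      rcases Nat.eq_zero_or_pos j with rfl | hj1
      · rw [pv_getD_set_eq _ _ _ _ (by rw [hblen, List.length_replicate]; omega)]
        rw [hb2]
        unfold pvDigit
        rw [if_pos rfl]
        omega
      · rw [pv_getD_set_ne _ _ _ _ _ (by omega), hbpt j]
        rw [if_pos (by constructor <;> omega)]
        unfold pvDigit
        rw [if_neg (by omega)]
        omega
    have hA := pv_loop2 (PySem.List.pySetD st.1 0 (st.2 + 1)) (n - 0).toNat 0 1
    rw [hA, hset0]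
    have hHV := pv_H_eq_V s n (st.1.set 0 (st.2 + 1)) n.toNat hpt
    have hnn : (n - 0).toNat = n.toNat := by omega
    rw [hnn, hHV n.toNat le_rfl]
    rw [pv_loopB s n (n - 1).toNat]
    have hsucc : (n - 1).toNat + 1 = n.toNat := by omega
    rw [hsucc]
    ring
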